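-- pv_equiv track=rewrite | github.com/PraveenKS30/Healix | tools/health_apis.py | _drug_base_fallback
-- ===== SOURCE A (Python) =====
-- _DOSAGE_NOISE = frozenset({
--     "extended-release", "sustained-release", "immediate-release",
--     "controlled-release", "delayed-release", "long-acting", "short-acting",
--     "er", "xr", "sr", "cr", "ir", "xl", "la", "dr",
--     "oral", "injectable", "topical", "inhaled", "generic", "brand",
-- })
--
-- def _drug_base_fallback(name: str) -> str:
--     """
--     Offline drug-name normalizer used when RxNorm is unreachable.
--
--     Picks the first token that isn't a dosage prefix, dose string, or
--     numeric/unit fragment. 'Sustained-release metformin 500mg' → 'metformin'.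
--     """
--     if not name:
--         return ""
--     for raw in name.lower().split():
--         token = raw.strip(",.()[]")
--         if not token or token in _DOSAGE_NOISE:
--             continue
--         if token[0].isdigit():
--             continue
--         if token.endswith(("mg", "mcg", "g", "ml", "%")):
--             continue
--         return token
--     # Last resort: first alphabetic token
--     for raw in name.lower().split():
--         if raw and raw[0].isalpha():
--             return raw.strip(",.()[]")
--     return ""
-- ===== SOURCE B (Python) =====
-- _DOSAGE_NOISE = frozenset({
--     "extended-release", "sustained-release", "immediate-release",
--     "controlled-release", "delayed-release", "long-acting", "short-acting",
--     "er", "xr", "sr", "cr", "ir", "xl", "la", "dr",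
--     "oral", "injectable", "topical", "inhaled", "generic", "brand",
-- })
--
--
-- def _drug_base_fallback(name: str) -> str:
--     """Single fused pass: remember the first alphabetic token as a fallback
--     while scanning for the first acceptable token, instead of two loops."""
--     if not name:
--         return ""
--     fallback = None
--     for raw in name.lower().split():
--         if fallback is None and raw and raw[0].isalpha():
--             fallback = raw.strip(",.()[]")
--         token = raw.strip(",.()[]")
--         if (token and token not in _DOSAGE_NOISE
--                 and not token[0].isdigit()
--                 and not token.endswith(("mg", "mcg", "g", "ml", "%"))):
--             return token
--     return fallback if fallback is not None else ""
-- ===== Notes on version B (the rewrite author's own statement) =====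
-- stated objective: simpler
-- what changed: B fuses A's two sequential passes over the token list into one loop that records the first alphabetic token as a fallback while scanning for the first acceptable token, returning the fallback only if the scan finds none.
import Mathlib
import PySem

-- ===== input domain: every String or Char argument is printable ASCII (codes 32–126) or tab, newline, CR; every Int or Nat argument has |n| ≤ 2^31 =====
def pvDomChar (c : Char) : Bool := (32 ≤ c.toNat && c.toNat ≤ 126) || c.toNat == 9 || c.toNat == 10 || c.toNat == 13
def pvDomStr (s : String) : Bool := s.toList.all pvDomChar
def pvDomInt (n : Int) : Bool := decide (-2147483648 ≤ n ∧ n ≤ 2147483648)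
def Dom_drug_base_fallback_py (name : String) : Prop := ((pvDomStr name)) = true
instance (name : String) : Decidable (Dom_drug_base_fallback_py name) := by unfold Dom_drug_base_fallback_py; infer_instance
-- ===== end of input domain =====

-- B fuses A's two passes into one loop that records the first alphabetic token
-- as a fallback while scanning for the first acceptable token (objective: simpler).
-- ===== PORT A =====
def pvNoise : List String := ["extended-release", "sustained-release", "immediate-release",
  "controlled-release", "delayed-release", "long-acting", "short-acting",
  "er", "xr", "sr", "cr", "ir", "xl", "la", "dr",
  "oral", "injectable", "topical", "inhaled", "generic", "brand"]

def pvStrip (s : String) : String := PySem.Str.stripChars s ",.()[]"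

def pvFirstIsDigit (s : String) : Bool :=
  match PySem.Str.pyGet? s 0 with
  | some c => PySem.Chars.isdigit c
  | none => false

def pvFirstIsAlpha (s : String) : Bool :=
  match PySem.Str.pyGet? s 0 with
  | some c => PySem.Chars.isalpha c
  | none => false

def pvEndsUnit (t : String) : Bool :=
  PySem.Str.endswith t "mg" || PySem.Str.endswith t "mcg" || PySem.Str.endswith t "g" ||
  PySem.Str.endswith t "ml" || PySem.Str.endswith t "%"

-- A's first loop: first token passing all filters
def pvALoop1 : List String → Option String
  | [] => none
  | raw :: rest =>
    let token := pvStrip raw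
    if token == "" || pvNoise.contains token then pvALoop1 rest
    else if pvFirstIsDigit token then pvALoop1 rest
    else if pvEndsUnit token then pvALoop1 rest
    else some token

-- A's second loop: first raw token whose first char is alphabetic, stripped
def pvALoop2 : List String → String
  | [] => ""
  | raw :: rest =>
    if !(raw == "") && pvFirstIsAlpha raw then pvStrip raw else pvALoop2 rest

def drug_base_fallback_py (name : String) : String :=
  if name == "" then ""
  else
    let words := PySem.Str.split₀ (PySem.Str.lower name)
    match pvALoop1 words with
    | some t => t
    | none => pvALoop2 words

-- ===== PORT B =====
-- single loop carrying the fallback accumulator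
def pvBLoop : List String → Option String → String
  | [], fb => fb.getD ""
  | raw :: rest, fb =>
    let fb := if fb.isNone && (!(raw == "") && pvFirstIsAlpha raw) then some (pvStrip raw) else fb
    let token := pvStrip raw
    if !(token == "") && !(pvNoise.contains token) && !(pvFirstIsDigit token) && !(pvEndsUnit token)
    then token
    else pvBLoop rest fb

def drug_base_fallback_py_alt (name : String) : String :=
  if name == "" then ""
  else pvBLoop (PySem.Str.split₀ (PySem.Str.lower name)) none

-- ===== PRECONDITION & SPEC =====
def Spec_drug_base_fallback_py (name : String) (out : String) : Prop := out = drug_base_fallback_py_alt name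
instance (name : String) (out : String) : Decidable (Spec_drug_base_fallback_py name out) := by unfold Spec_drug_base_fallback_py; infer_instance

-- ===== CLAIM (what is proved, stated in full; the proofs are below) =====
def Claim_equal_drug_base_fallback_py : Prop := ∀ (name : String), Dom_drug_base_fallback_py name → Spec_drug_base_fallback_py name (drug_base_fallback_py name)

-- ===== LEMMAS AND PROOFS =====

-- ===== VERDICT (by name: the statement is the Claim_ definition above) =====
lemma pvALoop1_cons (raw : String) (rest : List String) :
    pvALoop1 (raw :: rest) =
      (if !(pvStrip raw == "") && !(pvNoise.contains (pvStrip raw)) &&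
          !(pvFirstIsDigit (pvStrip raw)) && !(pvEndsUnit (pvStrip raw))
       then some (pvStrip raw)
       else pvALoop1 rest) := by
  simp only [pvALoop1]
  by_cases h1 : (pvStrip raw == "") = true <;>
  by_cases h2 : pvNoise.contains (pvStrip raw) = true <;>
  by_cases h3 : pvFirstIsDigit (pvStrip raw) = true <;>
  by_cases h4 : pvEndsUnit (pvStrip raw) = true <;>
    simp_all

lemma pvALoop2_cons (raw : String) (rest : List String) :
    pvALoop2 (raw :: rest) =
      if !(raw == "") && pvFirstIsAlpha raw then pvStrip raw else pvALoop2 rest := rfl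

lemma pvBLoop_eq (ws : List String) (fb : Option String) :
    pvBLoop ws fb =
      match pvALoop1 ws with
      | some t => t
      | none => match fb with
                | some f => f
                | none => pvALoop2 ws := by
  induction ws generalizing fb with
  | nil => cases fb <;> simp [pvBLoop, pvALoop1, pvALoop2]
  | cons raw rest ih =>
    rw [pvALoop1_cons]
    simp only [pvBLoop]
    cases hg : (!(pvStrip raw == "") && !(pvNoise.contains (pvStrip raw)) &&
        !(pvFirstIsDigit (pvStrip raw)) && !(pvEndsUnit (pvStrip raw))) with
    | true => simp
    | false =>
      simp only [Bool.false_eq_true, if_false, ih, pvALoop2_cons]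
      cases h4 : (!(raw == "") && pvFirstIsAlpha raw) <;> cases fb <;> simp_all

theorem drug_base_fallback_py_spec : Claim_equal_drug_base_fallback_py := by
  intro name _
  unfold Spec_drug_base_fallback_py drug_base_fallback_py drug_base_fallback_py_alt
  by_cases h : (name == "") = true
  · simp [h]
  · simp only [h, if_false, Bool.false_eq_true]
    rw [pvBLoop_eq]
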